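-- pv_equiv track=rewrite | github.com/blackcatdefi/pear-monitor-bot | fondo-blackcat-bot/modules/macro_convergence.py | _heuristic_direction
-- ===== SOURCE A (Python) =====
-- def _heuristic_direction(messages: list[str]) -> tuple[str, int, str]:
--     """Cheap fallback when the LLM is unavailable: keyword tally."""
--     if not messages:
--         return ("NO_CALL", 0, "")
--     bull_kw = ("long", "bull", "alcista", "compra", "rally", "ath", "rebote", "rip", "buy")
--     bear_kw = ("short", "bear", "bajista", "venta", "selloff", "dump", "crash", "sell")
--     bull = bear = 0
--     sample = ""
--     for m in messages:
--         low = m.lower()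
--         if any(k in low for k in bull_kw):
--             bull += 1
--             if not sample:
--                 sample = m[:200]
--         if any(k in low for k in bear_kw):
--             bear += 1
--             if not sample:
--                 sample = m[:200]
--     if bull == 0 and bear == 0:
--         return ("NO_CALL", 0, "")
--     if bull >= 2 * bear:
--         conf = min(50 + bull * 5, 80)
--         return ("BULL", conf, sample)
--     if bear >= 2 * bull:
--         conf = min(50 + bear * 5, 80)
--         return ("BEAR", conf, sample)
--     return ("NEUTRAL", 50, sample)
-- ===== SOURCE B (Python) =====
-- def _heuristic_direction(messages: list[str]) -> tuple[str, int, str]: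
--     """Cheap fallback when the LLM is unavailable: keyword tally."""
--     bull_kw = ("long", "bull", "alcista", "compra", "rally", "ath", "rebote", "rip", "buy")
--     bear_kw = ("short", "bear", "bajista", "venta", "selloff", "dump", "crash", "sell")
--     bull = sum(1 for m in messages if any(k in m.lower() for k in bull_kw))
--     bear = sum(1 for m in messages if any(k in m.lower() for k in bear_kw))
--     sample = next(
--         (m[:200] for m in messages
--          if any(k in m.lower() for k in bull_kw) or any(k in m.lower() for k in bear_kw)),
--         "",
--     )
--     if bull == 0 and bear == 0:
--         return ("NO_CALL", 0, "")
--     if bull >= 2 * bear: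
--         conf = min(50 + bull * 5, 80)
--         return ("BULL", conf, sample)
--     if bear >= 2 * bull:
--         conf = min(50 + bear * 5, 80)
--         return ("BEAR", conf, sample)
--     return ("NEUTRAL", 50, sample)
-- ===== Notes on version B (the rewrite author's own statement) =====
-- stated objective: simpler
-- what changed: Replaced the single fused loop carrying a (bull, bear, sample) accumulator by three independent declarative passes: a count of bull matches, a count of bear matches, and a next()-over-generator for the first matching message's 200-char sample; the empty-messages early return disappears because the counts are then 0.
import Mathlib
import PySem

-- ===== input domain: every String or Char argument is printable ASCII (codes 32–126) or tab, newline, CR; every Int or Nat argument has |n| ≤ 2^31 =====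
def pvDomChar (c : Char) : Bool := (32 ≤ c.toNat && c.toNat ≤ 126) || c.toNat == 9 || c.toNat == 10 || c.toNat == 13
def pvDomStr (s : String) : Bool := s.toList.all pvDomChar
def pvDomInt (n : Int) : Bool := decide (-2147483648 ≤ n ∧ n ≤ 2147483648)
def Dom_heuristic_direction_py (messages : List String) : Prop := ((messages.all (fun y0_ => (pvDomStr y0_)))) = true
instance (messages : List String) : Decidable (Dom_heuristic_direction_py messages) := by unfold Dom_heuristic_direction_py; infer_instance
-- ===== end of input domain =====

-- B replaces A's single fused loop (accumulator bull/bear/sample) by three independent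
-- declarative passes (two counts and a first-match sample); objective: simpler.


-- ===== PORT A =====
def pvBullKw : List String := ["long", "bull", "alcista", "compra", "rally", "ath", "rebote", "rip", "buy"]
def pvBearKw : List String := ["short", "bear", "bajista", "venta", "selloff", "dump", "crash", "sell"]

-- A's loop body: state (bull, bear, sample); 'low = m.lower()' computed once.
def pvStepA (st : Int × Int × String) (m : String) : Int × Int × String :=
  let low := PySem.Str.lower m
  let st :=
    if pvBullKw.any (fun k => PySem.Str.isIn k low) then
      (st.1 + 1, st.2.1, if st.2.2 = "" then PySem.Str.slice m none (some 200) else st.2.2)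
    else st
  let st :=
    if pvBearKw.any (fun k => PySem.Str.isIn k low) then
      (st.1, st.2.1 + 1, if st.2.2 = "" then PySem.Str.slice m none (some 200) else st.2.2)
    else st
  st

def heuristic_direction_py (messages : List String) : String × Int × String :=
  if messages.isEmpty then ("NO_CALL", 0, "")
  else
    let st := messages.foldl pvStepA ((0 : Int), (0 : Int), "")
    if st.1 = 0 ∧ st.2.1 = 0 then ("NO_CALL", 0, "")
    else if st.1 ≥ 2 * st.2.1 then ("BULL", min (50 + st.1 * 5) 80, st.2.2)
    else if st.2.1 ≥ 2 * st.1 then ("BEAR", min (50 + st.2.1 * 5) 80, st.2.2)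
    else ("NEUTRAL", 50, st.2.2)

-- ===== PORT B =====
-- any(k in m.lower() for k in kws)
def pvMatches (kws : List String) (m : String) : Bool :=
  kws.any (fun k => PySem.Str.isIn k (PySem.Str.lower m))

def heuristic_direction_py_alt (messages : List String) : String × Int × String :=
  let bull : Int := messages.countP (fun m => pvMatches pvBullKw m)
  let bear : Int := messages.countP (fun m => pvMatches pvBearKw m)
  let sample : String :=
    match messages.find? (fun m => pvMatches pvBullKw m || pvMatches pvBearKw m) with
    | some m => PySem.Str.slice m none (some 200)
    | none => ""
  if bull = 0 ∧ bear = 0 then ("NO_CALL", 0, "")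
  else if bull ≥ 2 * bear then ("BULL", min (50 + bull * 5) 80, sample)
  else if bear ≥ 2 * bull then ("BEAR", min (50 + bear * 5) 80, sample)
  else ("NEUTRAL", 50, sample)

-- ===== PRECONDITION & SPEC =====
def Spec_heuristic_direction_py (messages : List String) (out : String × Int × String) : Prop := out = heuristic_direction_py_alt messages
instance (messages : List String) (out : String × Int × String) : Decidable (Spec_heuristic_direction_py messages out) := by unfold Spec_heuristic_direction_py; infer_instance

-- ===== CLAIM (what is proved, stated in full; the proofs are below) =====
def Claim_equal_heuristic_direction_py : Prop := ∀ (messages : List String), Dom_heuristic_direction_py messages → Spec_heuristic_direction_py messages (heuristic_direction_py messages)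

-- ===== LEMMAS AND PROOFS =====

-- B's sample expression, named for the loop invariant.
def pvSampleB (msgs : List String) : String :=
  match msgs.find? (fun m => pvMatches pvBullKw m || pvMatches pvBearKw m) with
  | some m => PySem.Str.slice m none (some 200)
  | none => ""

lemma pvKw_ne_nil : ∀ k ∈ pvBullKw ++ pvBearKw, k.toList ≠ [] := by decide

-- a matched message is nonempty, hence its 200-char sample is nonempty
lemma pvSlice_ne_empty (m : String)
    (h : (pvMatches pvBullKw m || pvMatches pvBearKw m) = true) :
    PySem.Str.slice m none (some 200) ≠ "" := by
  have hk : ∃ k ∈ pvBullKw ++ pvBearKw, PySem.Str.isIn k (PySem.Str.lower m) = true := by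
    rcases Bool.or_eq_true_iff.mp h with h' | h' <;>
      rcases List.any_eq_true.mp h' with ⟨k, hk, hin⟩
    · exact ⟨k, List.mem_append_left _ hk, hin⟩
    · exact ⟨k, List.mem_append_right _ hk, hin⟩
  rcases hk with ⟨k, hk, hin⟩
  have hinf := (PySem.Str.isIn_iff_infix k (PySem.Str.lower m)).mp hin
  have hmne : m.toList ≠ [] := by
    intro hnil
    have hlow : (PySem.Str.lower m).toList = [] := by
      have : (PySem.Str.lower m).toList = m.toList.map PySem.Chars.lowerChar := by
        simp [PySem.Str.toList_lower]; rfl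
      simp [this, hnil]
    rw [hlow] at hinf
    exact pvKw_ne_nil k hk (List.eq_nil_of_infix_nil hinf)
  intro hs
  have : (PySem.Str.slice m none (some 200)).toList = [] := by rw [hs]; rfl
  rw [PySem.Str.toList_slice] at this
  have h200 : PySem.Chars.slice m.toList none (some 200) = m.toList.take 200 := by
    exact PySem.List.slice_to m.toList (by norm_num)
  rw [h200] at this
  cases hml : m.toList with
  | nil => exact hmne hml
  | cons c cs => rw [hml] at this; simp at this

-- A's fold from an arbitrary accumulator, characterised by B's three passes
lemma pvLoop_eq : ∀ (msgs : List String) (b e : Int) (s : String),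
    msgs.foldl pvStepA (b, e, s) =
      (b + (msgs.countP (fun m => pvMatches pvBullKw m) : Int),
       e + (msgs.countP (fun m => pvMatches pvBearKw m) : Int),
       if s = "" then pvSampleB msgs else s) := by
  intro msgs
  induction msgs with
  | nil => intro b e s; simp [pvSampleB]
  | cons m t ih =>
    intro b e s
    have e1 : pvStepA (b, e, s) m =
        (let st := if pvMatches pvBullKw m then
            ((b + 1 : Int), e, if s = "" then PySem.Str.slice m none (some 200) else s)
          else (b, e, s);
         if pvMatches pvBearKw m then
            (st.1, st.2.1 + 1, if st.2.2 = "" then PySem.Str.slice m none (some 200) else st.2.2)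
         else st) := rfl
    rw [List.foldl_cons, e1]
    by_cases hbu : pvMatches pvBullKw m = true <;>
      by_cases hbe : pvMatches pvBearKw m = true <;>
        by_cases hs : s = "" <;>
          simp only [hbu, hbe, hs, Bool.false_eq_true, if_true, if_false] <;>
          rw [ih] <;>
          simp [*, pvSampleB, Prod.ext_iff, pvSlice_ne_empty] <;>
          (try omega)

-- ===== VERDICT (by name: the statement is the Claim_ definition above) =====
theorem heuristic_direction_py_spec : Claim_equal_heuristic_direction_py := by
  intro messages _
  unfold Spec_heuristic_direction_py heuristic_direction_py heuristic_direction_py_alt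
  cases messages with
  | nil => simp
  | cons m t =>
    rw [pvLoop_eq]
    simp [pvSampleB]
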